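-- pv_equiv track=rewrite | github.com/dhanoosh2410/FYP-25-S3-11_Picteractive_SourceCode | server/story_gen.py | _parse_story
-- ===== SOURCE A (Python) =====
-- from typing import List, Optional, Dict, Any, Tuple
--
-- def _parse_story(text: str) -> Tuple[str, List[str]]:
--     title = ""
--     panels = ["","",""]
--     for line in (text or "").splitlines():
--         line=line.strip()
--         if not line: continue
--         up=line.upper()
--         if up.startswith("TITLE:"): title = line.split(":",1)[1].strip()
--         elif up.startswith("PANEL 1:"): panels[0] = line.split(":",1)[1].strip()
--         elif up.startswith("PANEL 2:"): panels[1] = line.split(":",1)[1].strip()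
--         elif up.startswith("PANEL 3:"): panels[2] = line.split(":",1)[1].strip()
--     return (title or ""), [p or "" for p in panels]
-- ===== SOURCE B (Python) =====
-- def _parse_story(text):
--     lines = [ln.strip() for ln in (text or "").splitlines()]
--
--     def last_value(label):
--         for ln in reversed(lines):
--             if ln.upper().startswith(label):
--                 return ln.split(":", 1)[1].strip()
--         return ""
--
--     return last_value("TITLE:"), [last_value("PANEL 1:"), last_value("PANEL 2:"), last_value("PANEL 3:")]
-- ===== Notes on version B (the rewrite author's own statement) =====
-- stated objective: alternative
-- what changed: Replaces the single slot-filling fold with if/elif state updates by a strip-once pass plus four independent backward searches (reversed scan with early exit) that each pick the last line matching their label.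
import Mathlib
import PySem

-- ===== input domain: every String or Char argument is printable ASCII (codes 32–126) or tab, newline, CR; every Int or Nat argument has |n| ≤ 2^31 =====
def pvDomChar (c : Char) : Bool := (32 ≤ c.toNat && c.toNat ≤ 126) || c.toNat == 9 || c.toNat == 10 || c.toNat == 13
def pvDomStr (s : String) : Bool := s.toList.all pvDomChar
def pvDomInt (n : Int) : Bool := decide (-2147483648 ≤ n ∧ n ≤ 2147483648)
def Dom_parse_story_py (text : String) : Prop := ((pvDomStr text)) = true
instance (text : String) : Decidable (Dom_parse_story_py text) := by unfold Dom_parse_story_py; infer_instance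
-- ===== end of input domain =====

-- B replaces A's single slot-filling fold by four independent backward (last-match) searches;
-- objective: alternative decomposition, same result.

-- shared by both ports (both Pythons contain the same expression `line.split(":", 1)[1].strip()`)
def pvVal (line : String) : String :=
  PySem.Str.strip ((PySem.List.pyGet? ((PySem.Str.splitMax? line ":" 1).getD []) 1).getD "")

-- ===== PORT A =====
def pvStepA (s : String × String × String × String) (raw : String) :
    String × String × String × String :=
  let line := PySem.Str.strip raw
  if line = "" then s
  else
    let up := PySem.Str.upper line
    if PySem.Str.startswith up "TITLE:" then (pvVal line, s.2.1, s.2.2.1, s.2.2.2)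
    else if PySem.Str.startswith up "PANEL 1:" then (s.1, pvVal line, s.2.2.1, s.2.2.2)
    else if PySem.Str.startswith up "PANEL 2:" then (s.1, s.2.1, pvVal line, s.2.2.2)
    else if PySem.Str.startswith up "PANEL 3:" then (s.1, s.2.1, s.2.2.1, pvVal line)
    else s

def parse_story_py (text : String) : String × List String :=
  let r := (PySem.Str.splitlines (if text = "" then "" else text)).foldl pvStepA ("", "", "", "")
  ((if r.1 = "" then "" else r.1),
   List.map (fun p => if p = "" then "" else p) [r.2.1, r.2.2.1, r.2.2.2])

-- ===== PORT B =====
def pvCond (label line : String) : Bool :=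
  PySem.Str.startswith (PySem.Str.upper line) label

-- `for ln in reversed(lines): if …: return …` / `return ""`
def pvLastValue (lines : List String) (label : String) : String :=
  match lines.reverse.find? (pvCond label) with
  | some ln => pvVal ln
  | none => ""

def parse_story_py_alt (text : String) : String × List String :=
  let lines := (PySem.Str.splitlines (if text = "" then "" else text)).map PySem.Str.strip
  (pvLastValue lines "TITLE:",
   [pvLastValue lines "PANEL 1:", pvLastValue lines "PANEL 2:", pvLastValue lines "PANEL 3:"])

-- ===== PRECONDITION & SPEC =====
def Spec_parse_story_py (text : String) (out : String × List String) : Prop := out = parse_story_py_alt text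
instance (text : String) (out : String × List String) : Decidable (Spec_parse_story_py text out) := by unfold Spec_parse_story_py; infer_instance

-- ===== CLAIM (what is proved, stated in full; the proofs are below) =====
def Claim_equal_parse_story_py : Prop := ∀ (text : String), Dom_parse_story_py text → Spec_parse_story_py text (parse_story_py text)

-- ===== LEMMAS AND PROOFS =====

-- two prefixes of the same string cannot differ at a common index
theorem pvPrefix_excl {u p q : List Char} (i : Nat) (hip : i < p.length) (hiq : i < q.length)
    (hne : p[i] ≠ q[i]) (hp : p <+: u) (hq : q <+: u) : False :=
  hne ((hp.getElem hip).trans (hq.getElem hiq).symm)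

theorem pvCond_excl {l p q : String} (i : Nat) (hip : i < p.toList.length)
    (hiq : i < q.toList.length) (hne : p.toList[i] ≠ q.toList[i])
    (h : pvCond p l = true) : pvCond q l = false := by
  rw [Bool.eq_false_iff]
  intro hq
  unfold pvCond at h hq
  simp only [PySem.Str.startswith_eq] at h hq
  rw [PySem.Chars.startswith_iff] at h hq
  exact pvPrefix_excl i hip hiq hne h hq

-- A's step updates the four slots independently (the elif branches are mutually exclusive)
theorem pvStepA_eq (s : String × String × String × String) (raw : String) :
    pvStepA s raw =
      (if pvCond "TITLE:" (PySem.Str.strip raw) then pvVal (PySem.Str.strip raw) else s.1,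
       if pvCond "PANEL 1:" (PySem.Str.strip raw) then pvVal (PySem.Str.strip raw) else s.2.1,
       if pvCond "PANEL 2:" (PySem.Str.strip raw) then pvVal (PySem.Str.strip raw) else s.2.2.1,
       if pvCond "PANEL 3:" (PySem.Str.strip raw) then pvVal (PySem.Str.strip raw) else s.2.2.2) := by
  obtain ⟨t, p1, p2, p3⟩ := s
  show (if PySem.Str.strip raw = "" then (t, p1, p2, p3) else _) = _
  by_cases hemp : PySem.Str.strip raw = ""
  · have e0 : pvCond "TITLE:" "" = false := by decide
    have e1 : pvCond "PANEL 1:" "" = false := by decide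
    have e2 : pvCond "PANEL 2:" "" = false := by decide
    have e3 : pvCond "PANEL 3:" "" = false := by decide
    simp [hemp, e0, e1, e2, e3]
  · simp only [if_neg hemp]
    by_cases h0 : pvCond "TITLE:" (PySem.Str.strip raw) = true
    · have f1 := pvCond_excl (q := "PANEL 1:") 0 (by decide) (by decide) (by decide) h0
      have f2 := pvCond_excl (q := "PANEL 2:") 0 (by decide) (by decide) (by decide) h0
      have f3 := pvCond_excl (q := "PANEL 3:") 0 (by decide) (by decide) (by decide) h0
      simp [pvCond] at h0 f1 f2 f3
      simp [pvCond, h0, f1, f2, f3]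
    · by_cases h1 : pvCond "PANEL 1:" (PySem.Str.strip raw) = true
      · have f2 := pvCond_excl (q := "PANEL 2:") 6 (by decide) (by decide) (by decide) h1
        have f3 := pvCond_excl (q := "PANEL 3:") 6 (by decide) (by decide) (by decide) h1
        simp [pvCond] at h0 h1 f2 f3
        simp [pvCond, h0, h1, f2, f3]
      · by_cases h2 : pvCond "PANEL 2:" (PySem.Str.strip raw) = true
        · have f3 := pvCond_excl (q := "PANEL 3:") 6 (by decide) (by decide) (by decide) h2
          simp [pvCond] at h0 h1 h2 f3
          simp [pvCond, h0, h1, h2, f3]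
        · by_cases h3 : pvCond "PANEL 3:" (PySem.Str.strip raw) = true
          · simp [pvCond] at h0 h1 h2 h3
            simp [pvCond, h0, h1, h2, h3]
          · simp [pvCond] at h0 h1 h2 h3
            simp [pvCond, h0, h1, h2, h3]

-- the per-label projection of A's fold
def pvF (label : String) (ms : List String) (x : String) : String :=
  ms.foldl (fun a l => if pvCond label l then pvVal l else a) x

-- A's four-slot fold is the tuple of four independent per-label folds over the stripped lines
theorem pvFold_eq (ls : List String) (t p1 p2 p3 : String) :
    ls.foldl pvStepA (t, p1, p2, p3) =
      (pvF "TITLE:" (ls.map PySem.Str.strip) t, pvF "PANEL 1:" (ls.map PySem.Str.strip) p1,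
       pvF "PANEL 2:" (ls.map PySem.Str.strip) p2, pvF "PANEL 3:" (ls.map PySem.Str.strip) p3) := by
  induction ls generalizing t p1 p2 p3 with
  | nil => rfl
  | cons r rest ih =>
    simp only [List.foldl_cons, List.map_cons]
    rw [pvStepA_eq]
    rw [ih]
    simp only [pvF, List.foldl_cons]

-- a last-write-wins fold started from "" is the last match, i.e. the first match of the reversed list
theorem pvF_eq_last (label : String) (ms : List String) :
    ∀ (x : String), pvF label ms x =
      match ms.reverse.find? (pvCond label) with
      | some ln => pvVal ln
      | none => x := by
  induction ms with
  | nil => intro x; rfl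
  | cons m rest ih =>
    intro x
    show pvF label rest (if pvCond label m then pvVal m else x) = _
    rw [ih]
    rw [List.reverse_cons, List.find?_append]
    cases h : List.find? (pvCond label) rest.reverse with
    | some ln => rfl
    | none =>
      by_cases hc : pvCond label m = true
      · simp [List.find?, hc]
      · rw [Bool.not_eq_true] at hc
        simp [List.find?, hc]

theorem pvOrEmpty (x : String) : (if x = "" then "" else x) = x := by
  by_cases h : x = "" <;> simp [h]

-- ===== VERDICT (by name: the statement is the Claim_ definition above) =====
theorem parse_story_py_spec : Claim_equal_parse_story_py := by
  intro text _
  unfold Spec_parse_story_py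
  simp only [parse_story_py, parse_story_py_alt]
  rw [pvFold_eq]
  simp only [List.map_cons, List.map_nil, pvOrEmpty]
  rw [pvF_eq_last, pvF_eq_last, pvF_eq_last, pvF_eq_last]
  rfl
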